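-- pv_equiv track=rewrite | github.com/ASSERT-KTH/Mokav | experiments/pynguin/c4b/single-return/generated_tests/src_427/7/src_427.py | func
-- ===== SOURCE A (Python) =====
-- def func(*args):
--
-- 	s = args[0].strip()
-- 	glas = 'AEIOUY'
-- 	ll = [0]
-- 	j = 0
-- 	for i in range(1, (len(s) + 1)):
-- 	    if (s[(i - 1)] in glas):
-- 	        ll.append((i - j))
-- 	        j = i
-- 	ll.append(((len(s) - j) + 1))
-- 	return(max(ll))
-- ===== SOURCE B (Python) =====
-- def func(*args):
--     s = args[0].strip()
--     bounds = [0] + [i + 1 for i, c in enumerate(s) if c in 'AEIOUY'] + [len(s) + 1]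
--     return max(b - a for a, b in zip(bounds, bounds[1:]))
-- ===== Notes on version B (the rewrite author's own statement) =====
-- stated objective: alternative
-- what changed: Instead of scanning indices while accumulating a list of running gap values, B first materialises the list of vowel boundary positions (via enumerate) padded with 0 and len(s)+1, then returns the max of consecutive differences of that boundary list (zip of the list with its tail).
import Mathlib
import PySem

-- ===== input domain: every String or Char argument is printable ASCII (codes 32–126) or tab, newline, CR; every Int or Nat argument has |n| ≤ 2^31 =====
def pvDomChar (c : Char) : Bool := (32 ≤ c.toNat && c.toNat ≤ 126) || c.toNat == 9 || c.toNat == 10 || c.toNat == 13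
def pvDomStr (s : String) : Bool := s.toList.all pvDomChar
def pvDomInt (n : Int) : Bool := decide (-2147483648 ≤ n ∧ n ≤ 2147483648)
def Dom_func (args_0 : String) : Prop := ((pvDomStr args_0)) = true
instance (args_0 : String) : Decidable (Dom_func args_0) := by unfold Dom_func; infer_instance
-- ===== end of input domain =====

-- B replaces A's running-gap accumulation loop by a staged computation: build the list of
-- vowel boundary positions, pad it with 0 and len(s)+1, and take the max of consecutive
-- differences (alternative decomposition, same O(n) cost).

-- ===== PORT A =====
def func (args_0 : String) : Int :=
  let s := (PySem.Str.strip args_0).toList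
  let st := (PySem.List.pyRange 1 (PySem.Chars.len s + 1) 1).foldl
    (fun (st : List Int × Int) i =>
      if PySem.Chars.isIn [PySem.List.pyGetD s (i - 1) ' '] "AEIOUY".toList then
        (st.1 ++ [i - st.2], i)
      else st)
    ([0], 0)
  let ll := st.1 ++ [PySem.Chars.len s - st.2 + 1]
  (PySem.List.max? ll (fun x => x)).getD 0

-- ===== PORT B =====
def func_alt (args_0 : String) : Int :=
  let s := (PySem.Str.strip args_0).toList
  let bounds : List Int :=
    0 :: ((PySem.List.enumerate s 0).filterMap
      (fun p => if PySem.Chars.isIn [p.2] "AEIOUY".toList then some (p.1 + 1) else none))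
      ++ [PySem.Chars.len s + 1]
  (PySem.List.max? ((bounds.zip bounds.tail).map (fun p => p.2 - p.1)) (fun x => x)).getD 0

-- ===== PRECONDITION & SPEC =====
def Spec_func (args_0 : String) (out : Int) : Prop := out = func_alt args_0
instance (args_0 : String) (out : Int) : Decidable (Spec_func args_0 out) := by unfold Spec_func; infer_instance

-- ===== CLAIM (what is proved, stated in full; the proofs are below) =====
def Claim_equal_func : Prop := ∀ (args_0 : String), Dom_func args_0 → Spec_func args_0 (func args_0)

-- ===== LEMMAS AND PROOFS =====

-- A's loop, as structural recursion on the remaining characters (k = characters consumed).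
def goA : List Char → Int → List Int × Int → List Int × Int
  | [], _, st => st
  | c :: r, k, st =>
      goA r (k + 1)
        (if PySem.Chars.isIn [c] "AEIOUY".toList then (st.1 ++ [(k + 1) - st.2], k + 1) else st)

-- 1-based vowel positions of a suffix, start offset k.
def vb : List Char → Int → List Int
  | [], _ => []
  | c :: r, k =>
      if PySem.Chars.isIn [c] "AEIOUY".toList then (k + 1) :: vb r (k + 1) else vb r (k + 1)

-- consecutive differences seeded by j, and the last boundary (j if none).
def diffsJ : Int → List Int → List Int
  | _, [] => []
  | j, b :: bs => (b - j) :: diffsJ b bs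

def lastD : Int → List Int → Int
  | j, [] => j
  | _, b :: bs => lastD b bs

-- A's pyRange fold over indices pre.length+1 .. equals goA on the suffix.
lemma rangeA (suf : List Char) : ∀ (pre s : List Char) (st : List Int × Int), s = pre ++ suf →
    (PySem.List.pyRange ((pre.length : Int) + 1) ((s.length : Int) + 1) 1).foldl
      (fun (st : List Int × Int) i =>
        if PySem.Chars.isIn [PySem.List.pyGetD s (i - 1) ' '] "AEIOUY".toList then
          (st.1 ++ [i - st.2], i)
        else st) st
    = goA suf (pre.length : Int) st := by
  induction suf with
  | nil =>
      intro pre s st h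
      subst h
      rw [PySem.List.pyRange_one_eq_nil (by simp)]
      rfl
  | cons c r ih =>
      intro pre s st h
      subst h
      rw [PySem.List.pyRange_one_cons (by simp only [List.length_append, List.length_cons]; push_cast; omega)]
      simp only [List.foldl_cons]
      have hget : PySem.List.pyGetD (pre ++ c :: r) ((pre.length : Int) + 1 - 1) ' ' = c := by
        have h0 : (pre.length : Int) + 1 - 1 = (pre.length : Int) := by ring
        rw [h0, PySem.List.pyGetD_natCast]
        simp [List.getD]
      rw [hget]
      have hl : (((pre ++ [c]).length : Nat) : Int) = (pre.length : Int) + 1 := by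
        simp
      have h3 := ih (pre ++ [c]) (pre ++ c :: r)
        (if PySem.Chars.isIn [c] "AEIOUY".toList then
          (st.1 ++ [(pre.length : Int) + 1 - st.2], (pre.length : Int) + 1) else st)
        (by simp)
      rw [hl] at h3
      simp only [goA]
      exact h3

-- goA's result, characterised by the vowel-boundary list.
lemma goA_eq (suf : List Char) : ∀ (k j : Int) (acc : List Int),
    goA suf k (acc, j) = (acc ++ diffsJ j (vb suf k), lastD j (vb suf k)) := by
  induction suf with
  | nil => intro k j acc; simp [goA, vb, diffsJ, lastD]
  | cons c r ih =>
      intro k j acc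
      by_cases hv : PySem.Chars.isIn [c] "AEIOUY".toList
      · simp only [goA, vb, hv, if_true]
        rw [ih (k + 1) (k + 1) (acc ++ [k + 1 - j])]
        simp [diffsJ, lastD, List.append_assoc]
      · simp only [goA, vb, hv, Bool.false_eq_true, if_false]
        exact ih (k + 1) j acc

-- B's comprehension over enumerate is the same boundary list.
lemma fm_eq (s : List Char) : ∀ (k : Int),
    (PySem.List.enumerate s k).filterMap
      (fun p => if PySem.Chars.isIn [p.2] "AEIOUY".toList then some (p.1 + 1) else none)
    = vb s k := by
  induction s with
  | nil => intro k; simp [PySem.List.enumerate_nil, vb]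
  | cons c r ih =>
      intro k
      rw [PySem.List.enumerate_cons, List.filterMap_cons]
      by_cases hv : PySem.Chars.isIn [c] "AEIOUY".toList
      · simp only [hv, if_true, vb, ih]
      · simp only [hv, Bool.false_eq_true, if_false, vb, ih]

-- zip-with-tail differences of a padded boundary list.
lemma zipdiff (bs : List Int) : ∀ (j L : Int),
    (((j :: bs ++ [L]).zip (j :: bs ++ [L]).tail).map (fun p => p.2 - p.1))
    = diffsJ j bs ++ [L - lastD j bs] := by
  induction bs with
  | nil => intro j L; simp [diffsJ, lastD]
  | cons b t ih =>
      intro j L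
      simp only [List.cons_append, List.tail_cons, List.zip_cons_cons, List.map_cons, diffsJ, lastD]
      have := ih b L
      simp only [List.cons_append, List.tail_cons] at this
      rw [this]

-- every vowel boundary exceeds the offset.
lemma vb_pos (s : List Char) : ∀ (k : Int), ∀ b ∈ vb s k, k < b := by
  induction s with
  | nil => intro k b hb; simp [vb] at hb
  | cons c r ih =>
      intro k b hb
      by_cases hv : PySem.Chars.isIn [c] "AEIOUY".toList
      · simp only [vb, hv, if_true, List.mem_cons] at hb
        rcases hb with h | h
        · omega
        · have := ih (k + 1) b h; omega
      · simp only [vb, hv, Bool.false_eq_true, if_false] at hb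
        have := ih (k + 1) b hb; omega

-- ===== VERDICT (by name: the statement is the Claim_ definition above) =====
theorem func_spec : Claim_equal_func := by
  intro args_0 _
  unfold Spec_func func func_alt
  simp only [PySem.Chars.len_eq]
  generalize (PySem.Str.strip args_0).toList = s
  have hA := rangeA s [] s ([0], 0) (List.nil_append s).symm
  simp only [List.length_nil, Int.natCast_zero, zero_add] at hA
  rw [hA, goA_eq s 0 0 [0], fm_eq s 0]
  have ht : (s.length : Int) - lastD 0 (vb s 0) + 1 = ((s.length : Int) + 1) - lastD 0 (vb s 0) := by
    ring
  have hz := zipdiff (vb s 0) 0 ((s.length : Int) + 1)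
  simp only [List.cons_append] at hz ⊢
  rw [List.append_assoc, ht]
  show (PySem.List.max? (0 :: (diffsJ 0 (vb s 0) ++ [(s.length : Int) + 1 - lastD 0 (vb s 0)])) (fun x => x)).getD 0 = _
  rw [hz, PySem.List.max?_id_cons]
  cases hvb : vb s 0 with
  | nil =>
      simp only [diffsJ, lastD, List.nil_append, PySem.List.max?_id_cons, List.foldl_cons,
        List.foldl_nil, Option.getD_some]
      omega
  | cons b bs =>
      have hb : (0:Int) < b := vb_pos s 0 b (by rw [hvb]; exact List.mem_cons_self)
      simp only [diffsJ, List.cons_append, PySem.List.max?_id_cons, List.foldl_cons,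
        Option.getD_some]
      have h0 : max (0:Int) (b - 0) = b - 0 := by omega
      rw [h0]
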